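-- pv_equiv track=rewrite | github.com/crafaelgil/Coding-Interview-Solutions | Dynamic Programming/longest_bitonic_subarray.py | find_longest_bitonic_subarray
-- ===== SOURCE A (Python) =====
-- def find_longest_bitonic_subarray(arr):
--   if not arr or len(arr) == 0:
--     return 0
--
--   I = [1] * len(arr)
--   D = [1] * len(arr)
--
--   for i in range(1, len(arr)):
--     if arr[i-1] < arr[i]:
--       I[i] = I[i-1] + 1
--
--   for i in reversed(range(len(arr)-1)):
--     if arr[i] > arr[i+1]:
--       D[i] = D[i+1] + 1
--
--   lbs_len = 1
--   start = end = 0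
--
--   for i in range(len(arr)):
--     if lbs_len < I[i] + D[i] - 1:
--       lbs_len = I[i] + D[i] - 1
--       start = i - I[i] + 1
--       end = i + D[i] - 1
--
--   return arr[start: end+1]
-- ===== SOURCE B (Python) =====
-- def find_longest_bitonic_subarray(arr):
--   n = len(arr)
--   if n == 0:
--     return []
--
--   # one backward pass: d = length of strictly decreasing run starting at i,
--   # b = length of the maximal up-then-down (bitonic) window starting at i;
--   # keep the leftmost longest window (>= while moving left keeps the leftmost).
--   d = 1
--   b = 1
--   best_start = n - 1
--   best_len = 1
--
--   for i in range(n - 2, -1, -1):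
--     if arr[i] > arr[i + 1]:
--       d = d + 1
--       b = d
--     elif arr[i] < arr[i + 1]:
--       b = b + 1
--       d = 1
--     else:
--       d = 1
--       b = 1
--     if b >= best_len:
--       best_start = i
--       best_len = b
--
--   return arr[best_start: best_start + best_len]
-- ===== Notes on version B (the rewrite author's own statement) =====
-- stated objective: alternative
-- what changed: Replaced the two DP tables I/D plus a third selection pass by a single backward pass that maintains only the current decreasing-run length and the current bitonic-window length, keeping the leftmost longest window; O(1) extra space instead of two O(n) tables.
-- outside the precondition, e.g. on find_longest_bitonic_subarray([]): A returns 0, B returns []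
import Mathlib
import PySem

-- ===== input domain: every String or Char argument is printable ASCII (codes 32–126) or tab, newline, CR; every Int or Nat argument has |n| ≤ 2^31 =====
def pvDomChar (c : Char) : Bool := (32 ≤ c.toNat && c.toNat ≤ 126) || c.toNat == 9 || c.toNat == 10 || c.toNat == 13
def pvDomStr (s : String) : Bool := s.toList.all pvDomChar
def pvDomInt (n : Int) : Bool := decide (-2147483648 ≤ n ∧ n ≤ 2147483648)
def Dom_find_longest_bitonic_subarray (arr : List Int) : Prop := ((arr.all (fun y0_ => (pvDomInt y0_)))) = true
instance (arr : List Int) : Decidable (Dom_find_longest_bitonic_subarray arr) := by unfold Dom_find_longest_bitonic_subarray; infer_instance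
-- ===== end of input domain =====

-- B replaces A's two DP tables (I and D) and third selection pass by one backward pass that keeps
-- only the current decreasing-run length, the current bitonic-window length and the best window
-- seen so far (O(1) extra space instead of two O(n) tables).

-- ===== PORT A =====
-- 'if not arr or len(arr) == 0: return 0' returns an int, not a list; those inputs are outside
-- Pre_find_longest_bitonic_subarray and the port returns [] there.
def find_longest_bitonic_subarray (arr : List Int) : List Int :=
  if arr.length = 0 then []
  else
    let n : Int := arr.length
    let I := (PySem.List.pyRange 1 n 1).foldl (fun I i =>
        if PySem.List.pyGetD arr (i - 1) 0 < PySem.List.pyGetD arr i 0 then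
          PySem.List.pySetD I i (PySem.List.pyGetD I (i - 1) 0 + 1)
        else I)
      (List.replicate arr.length (1 : Int))
    let D := ((PySem.List.pyRange 0 (n - 1) 1).reverse).foldl (fun D i =>
        if PySem.List.pyGetD arr i 0 > PySem.List.pyGetD arr (i + 1) 0 then
          PySem.List.pySetD D i (PySem.List.pyGetD D (i + 1) 0 + 1)
        else D)
      (List.replicate arr.length (1 : Int))
    let r := (PySem.List.pyRange 0 n 1).foldl (fun (st : Int × Int × Int) i =>
        if st.1 < PySem.List.pyGetD I i 0 + PySem.List.pyGetD D i 0 - 1 then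
          (PySem.List.pyGetD I i 0 + PySem.List.pyGetD D i 0 - 1,
           i - PySem.List.pyGetD I i 0 + 1,
           i + PySem.List.pyGetD D i 0 - 1)
        else st) ((1 : Int), (0 : Int), (0 : Int))
    PySem.List.slice arr (some r.2.1) (some (r.2.2 + 1))

-- ===== PORT B =====
def find_longest_bitonic_subarray_alt (arr : List Int) : List Int :=
  let n : Int := arr.length
  if n = 0 then []
  else
    let st := (PySem.List.pyRange (n - 2) (-1) (-1)).foldl
      (fun (st : Int × Int × Int × Int) i =>
        let db :=
          if PySem.List.pyGetD arr i 0 > PySem.List.pyGetD arr (i + 1) 0 then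
            (st.1 + 1, st.1 + 1)
          else if PySem.List.pyGetD arr i 0 < PySem.List.pyGetD arr (i + 1) 0 then
            ((1 : Int), st.2.1 + 1)
          else ((1 : Int), (1 : Int))
        if db.2 ≥ st.2.2.2 then (db.1, db.2, i, db.2)
        else (db.1, db.2, st.2.2.1, st.2.2.2))
      ((1 : Int), (1 : Int), n - 1, (1 : Int))
    PySem.List.slice arr (some st.2.2.1) (some (st.2.2.1 + st.2.2.2))

-- ===== PRECONDITION & SPEC =====
-- Pre_ excludes only the empty list, on which A returns the int 0 (not a list).
def Pre_find_longest_bitonic_subarray (arr : List Int) : Prop := arr ≠ []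
instance (arr : List Int) : Decidable (Pre_find_longest_bitonic_subarray arr) := by
  unfold Pre_find_longest_bitonic_subarray; infer_instance

def pvWitness_find_longest_bitonic_subarray : List Int := [1, 2, 1]

def Spec_find_longest_bitonic_subarray (arr : List Int) (out : List Int) : Prop :=
  out = find_longest_bitonic_subarray_alt arr
instance (arr : List Int) (out : List Int) : Decidable (Spec_find_longest_bitonic_subarray arr out) := by
  unfold Spec_find_longest_bitonic_subarray; infer_instance

-- ===== CLAIM (what is proved, stated in full; the proofs are below) =====
def Claim_equal_find_longest_bitonic_subarray : Prop := ∀ (arr : List Int), Dom_find_longest_bitonic_subarray arr → Pre_find_longest_bitonic_subarray arr → Spec_find_longest_bitonic_subarray arr (find_longest_bitonic_subarray arr)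

-- ===== LEMMAS AND PROOFS =====

-- I[i] of A: length of the maximal strictly increasing run ending at i.
def Ifun (arr : List Int) : Nat → Nat
  | 0 => 1
  | i + 1 => if arr.getD i 0 < arr.getD (i + 1) 0 then Ifun arr i + 1 else 1

-- D[i] of A: length of the maximal strictly decreasing run starting at i.
def Dfun (arr : List Int) (i : Nat) : Nat :=
  if h : i + 1 < arr.length ∧ arr.getD i 0 > arr.getD (i + 1) 0 then Dfun arr (i + 1) + 1 else 1
termination_by arr.length - i
decreasing_by omega

-- B's b: length of the maximal up-then-down window starting at i.
def Bfun (arr : List Int) (i : Nat) : Nat :=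
  if h : i + 1 < arr.length then
    if arr.getD i 0 > arr.getD (i + 1) 0 then Dfun arr (i + 1) + 1
    else if arr.getD i 0 < arr.getD (i + 1) 0 then Bfun arr (i + 1) + 1
    else 1
  else 1
termination_by arr.length - i
decreasing_by omega

-- max of Bfun over [i, length)
def maxB (arr : List Int) (i : Nat) : Nat :=
  if h : i + 1 < arr.length then max (Bfun arr i) (maxB arr (i + 1)) else Bfun arr i
termination_by arr.length - i
decreasing_by omega

-- leftmost index of [i, length) attaining maxB (B keeps the leftmost via ≥ scanning right-to-left)
def bsf (arr : List Int) (i : Nat) : Nat :=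
  if h : i + 1 < arr.length then
    (if maxB arr (i + 1) ≤ Bfun arr i then i else bsf arr (i + 1))
  else i
termination_by arr.length - i
decreasing_by omega

-- end of the strictly increasing run starting at s
def peakf (arr : List Int) (s : Nat) : Nat :=
  if h : s + 1 < arr.length ∧ arr.getD s 0 < arr.getD (s + 1) 0 then peakf arr (s + 1) else s
termination_by arr.length - s
decreasing_by omega

def candN (arr : List Int) (i : Nat) : Nat := Ifun arr i - 1 + Dfun arr i

-- A's selection loop, index-free form
def selNat (arr : List Int) : Nat → Nat × Nat × Nat
  | 0 => (1, 0, 0)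
  | m + 1 =>
    if (selNat arr m).1 < candN arr m then (candN arr m, m + 1 - Ifun arr m, m + Dfun arr m - 1)
    else selNat arr m

theorem Ifun_pos (arr : List Int) (i : Nat) : 1 ≤ Ifun arr i := by
  cases i
  · simp [Ifun]
  · simp only [Ifun]; split_ifs <;> omega

theorem Ifun_le (arr : List Int) (i : Nat) : Ifun arr i ≤ i + 1 := by
  induction i with
  | zero => simp [Ifun]
  | succ i ih => simp only [Ifun]; split <;> omega

theorem Dfun_pos (arr : List Int) (i : Nat) : 1 ≤ Dfun arr i := by
  rw [Dfun]; split_ifs <;> omega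

theorem Bfun_pos (arr : List Int) (i : Nat) : 1 ≤ Bfun arr i := by
  rw [Bfun]; split_ifs <;> simp

theorem set_map_range {α : Type} (n j : Nat) (f : Nat → α) (v : α) (_hj : j < n) :
    ((List.range n).map f).set j v = (List.range n).map (fun k => if k = j then v else f k) := by
  apply List.ext_getElem
  · simp
  · intro k hk1 hk2
    simp only [List.getElem_set, List.getElem_map, List.getElem_range]
    by_cases h : j = k
    · simp [h]
    · simp [h, Ne.symm h]

theorem replicate_one_eq_map (n : Nat) :
    List.replicate n (1 : Int) = (List.range n).map (fun _ => (1 : Int)) := by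
  apply List.ext_getElem <;> simp

-- A's I table equals Ifun, cumulative form
theorem Ifold_aux (arr : List Int) (m : Nat) (hm : m ≤ arr.length) :
    (PySem.List.pyRange 1 (m : Int) 1).foldl (fun I i =>
        if PySem.List.pyGetD arr (i - 1) 0 < PySem.List.pyGetD arr i 0 then
          PySem.List.pySetD I i (PySem.List.pyGetD I (i - 1) 0 + 1)
        else I)
      (List.replicate arr.length (1 : Int)) =
    (List.range arr.length).map (fun j => if j < m then (Ifun arr j : Int) else 1) := by
  induction m with
  | zero =>
    rw [PySem.List.pyRange_one_eq_nil (by norm_num), List.foldl_nil, replicate_one_eq_map]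
    apply List.map_congr_left
    intro k _
    simp
  | succ m ih =>
    rcases Nat.eq_zero_or_pos m with rfl | hpos
    · rw [show ((0 + 1 : Nat) : Int) = 1 by norm_num,
        PySem.List.pyRange_one_eq_nil (by norm_num), List.foldl_nil, replicate_one_eq_map]
      apply List.map_congr_left
      intro k _
      by_cases hk : k < 1
      · have : k = 0 := by omega
        subst this
        simp [Ifun]
      · simp [hk]
    · have hcast : ((m + 1 : Nat) : Int) = (m : Int) + 1 := by push_cast; ring
      rw [hcast, PySem.List.pyRange_one_succ_right (by exact_mod_cast hpos),
        List.foldl_append, ih (by omega), List.foldl_cons, List.foldl_nil]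
      have h1 : ((m : Int) - 1) = ((m - 1 : Nat) : Int) := by omega
      rw [h1]
      simp only [PySem.List.pyGetD_natCast, PySem.List.pySetD_natCast]
      have hm1 : m - 1 + 1 = m := by omega
      have hIm : Ifun arr (m - 1 + 1) = if arr.getD (m - 1) 0 < arr.getD (m - 1 + 1) 0
          then Ifun arr (m - 1) + 1 else 1 := by simp only [Ifun]
      rw [hm1] at hIm
      rw [PySem.List.getD_map_range _ _ _ _ (show m - 1 < arr.length by omega),
        if_pos (show m - 1 < m by omega)]
      by_cases hc : arr.getD (m - 1) 0 < arr.getD m 0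
      · rw [if_pos hc, set_map_range arr.length m _ _ (by omega)]
        apply List.map_congr_left
        intro k hk
        rcases eq_or_ne k m with rfl | hne
        · rw [if_pos rfl, if_pos (by omega), hIm, if_pos hc]
          push_cast
          ring
        · rw [if_neg hne]
          by_cases hklt : k < m
          · rw [if_pos hklt, if_pos (by omega)]
          · rw [if_neg hklt, if_neg (by omega)]
      · rw [if_neg hc]
        apply List.map_congr_left
        intro k hk
        rcases eq_or_ne k m with rfl | hne
        · rw [if_neg (by omega), if_pos (by omega), hIm, if_neg hc]
          norm_num
        · by_cases hklt : k < m
          · rw [if_pos hklt, if_pos (by omega)]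
          · rw [if_neg hklt, if_neg (by omega)]

-- A's I table equals Ifun
theorem Ifold (arr : List Int) :
    (PySem.List.pyRange 1 (arr.length : Int) 1).foldl (fun I i =>
        if PySem.List.pyGetD arr (i - 1) 0 < PySem.List.pyGetD arr i 0 then
          PySem.List.pySetD I i (PySem.List.pyGetD I (i - 1) 0 + 1)
        else I)
      (List.replicate arr.length (1 : Int)) =
    (List.range arr.length).map (fun j => (Ifun arr j : Int)) := by
  rw [Ifold_aux arr arr.length (le_refl _)]
  apply List.map_congr_left
  intro k hk
  rw [if_pos (List.mem_range.mp hk)]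

-- A's D table equals Dfun, cumulative form (entries from i on are already computed)
theorem Dfold_aux (arr : List Int) (i : Nat) (hi : i < arr.length) :
    ((PySem.List.pyRange 0 (i : Int) 1).reverse).foldl (fun D i =>
        if PySem.List.pyGetD arr i 0 > PySem.List.pyGetD arr (i + 1) 0 then
          PySem.List.pySetD D i (PySem.List.pyGetD D (i + 1) 0 + 1)
        else D)
      ((List.range arr.length).map (fun j => if i ≤ j then (Dfun arr j : Int) else 1)) =
    (List.range arr.length).map (fun j => if 0 ≤ j then (Dfun arr j : Int) else 1) := by
  induction i with
  | zero =>
    rw [PySem.List.pyRange_one_eq_nil (by norm_num)]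
    simp
  | succ i ih =>
    have hcast : ((i + 1 : Nat) : Int) = (i : Int) + 1 := by push_cast; ring
    rw [hcast, PySem.List.pyRange_one_succ_right (by positivity), List.reverse_append]
    simp only [List.reverse_cons, List.reverse_nil, List.nil_append, List.singleton_append,
      List.foldl_cons]
    have hstep : (if PySem.List.pyGetD arr (i : Int) 0 > PySem.List.pyGetD arr ((i : Int) + 1) 0 then
          PySem.List.pySetD ((List.range arr.length).map (fun j => if i + 1 ≤ j then (Dfun arr j : Int) else 1)) (i : Int)
            (PySem.List.pyGetD ((List.range arr.length).map (fun j => if i + 1 ≤ j then (Dfun arr j : Int) else 1)) ((i : Int) + 1) 0 + 1)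
        else ((List.range arr.length).map (fun j => if i + 1 ≤ j then (Dfun arr j : Int) else 1))) =
        (List.range arr.length).map (fun j => if i ≤ j then (Dfun arr j : Int) else 1) := by
      have hc1 : ((i : Int) + 1) = ((i + 1 : Nat) : Int) := by push_cast; ring
      rw [hc1]
      simp only [PySem.List.pyGetD_natCast, PySem.List.pySetD_natCast]
      rw [PySem.List.getD_map_range _ _ _ _ hi, if_pos (le_refl (i + 1))]
      by_cases hc : arr.getD i 0 > arr.getD (i + 1) 0
      · have hDi : Dfun arr i = Dfun arr (i + 1) + 1 := by rw [Dfun, dif_pos ⟨hi, hc⟩]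
        rw [if_pos hc, set_map_range arr.length i _ _ (by omega)]
        apply List.map_congr_left
        intro k _
        rcases eq_or_ne k i with rfl | hne
        · rw [if_pos rfl, if_pos (le_refl k), hDi]
          push_cast
          ring
        · rw [if_neg hne]
          by_cases hk : i + 1 ≤ k
          · rw [if_pos hk, if_pos (by omega)]
          · rw [if_neg hk, if_neg (by omega)]
      · have hDi : Dfun arr i = 1 := by rw [Dfun, dif_neg (by tauto)]
        rw [if_neg hc]
        apply List.map_congr_left
        intro k _
        rcases eq_or_ne k i with rfl | hne
        · rw [if_neg (by omega), if_pos (le_refl k), hDi]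
          norm_num
        · by_cases hk : i + 1 ≤ k
          · rw [if_pos hk, if_pos (by omega)]
          · rw [if_neg hk, if_neg (by omega)]
    rw [hstep, ih (by omega)]

-- A's D table equals Dfun
theorem Dfold (arr : List Int) :
    ((PySem.List.pyRange 0 ((arr.length : Int) - 1) 1).reverse).foldl (fun D i =>
        if PySem.List.pyGetD arr i 0 > PySem.List.pyGetD arr (i + 1) 0 then
          PySem.List.pySetD D i (PySem.List.pyGetD D (i + 1) 0 + 1)
        else D)
      (List.replicate arr.length (1 : Int)) =
    (List.range arr.length).map (fun j => (Dfun arr j : Int)) := by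
  rcases Nat.eq_zero_or_pos arr.length with h0 | hpos
  · rw [h0]
    rw [PySem.List.pyRange_one_eq_nil (by norm_num)]
    simp
  · have hcast : ((arr.length : Int) - 1) = ((arr.length - 1 : Nat) : Int) := by omega
    have hrep : List.replicate arr.length (1 : Int) =
        (List.range arr.length).map (fun j => if arr.length - 1 ≤ j then (Dfun arr j : Int) else 1) := by
      rw [replicate_one_eq_map]
      apply List.map_congr_left
      intro k hk
      have hk' := List.mem_range.mp hk
      by_cases h : arr.length - 1 ≤ k
      · have hd1 : Dfun arr k = 1 := by rw [Dfun, dif_neg (by omega)]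
        rw [if_pos h, hd1]
        norm_num
      · rw [if_neg h]
    rw [hcast, hrep, Dfold_aux arr (arr.length - 1) (by omega)]
    apply List.map_congr_left
    intro k _
    rw [if_pos (by omega)]

-- A's selection loop equals selNat, cumulative form
theorem selfold_aux (arr : List Int) (m : Nat) (hm : m ≤ arr.length) :
    (PySem.List.pyRange 0 (m : Int) 1).foldl (fun (st : Int × Int × Int) i =>
        if st.1 < PySem.List.pyGetD ((List.range arr.length).map (fun j => (Ifun arr j : Int))) i 0
                 + PySem.List.pyGetD ((List.range arr.length).map (fun j => (Dfun arr j : Int))) i 0 - 1 then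
          (PySem.List.pyGetD ((List.range arr.length).map (fun j => (Ifun arr j : Int))) i 0
             + PySem.List.pyGetD ((List.range arr.length).map (fun j => (Dfun arr j : Int))) i 0 - 1,
           i - PySem.List.pyGetD ((List.range arr.length).map (fun j => (Ifun arr j : Int))) i 0 + 1,
           i + PySem.List.pyGetD ((List.range arr.length).map (fun j => (Dfun arr j : Int))) i 0 - 1)
        else st) ((1 : Int), (0 : Int), (0 : Int)) =
    (((selNat arr m).1 : Int), ((selNat arr m).2.1 : Int), ((selNat arr m).2.2 : Int)) := by
  induction m with
  | zero =>
    rw [PySem.List.pyRange_one_eq_nil (by norm_num), List.foldl_nil]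
    simp [selNat]
  | succ m ih =>
    have hcast : ((m + 1 : Nat) : Int) = (m : Int) + 1 := by push_cast; ring
    rw [hcast, PySem.List.pyRange_one_succ_right (by positivity), List.foldl_append,
      ih (by omega), List.foldl_cons, List.foldl_nil]
    simp only [PySem.List.pyGetD_natCast]
    rw [PySem.List.getD_map_range _ _ _ _ (show m < arr.length by omega),
      PySem.List.getD_map_range _ _ _ _ (show m < arr.length by omega)]
    have hIp := Ifun_pos arr m
    have hIl := Ifun_le arr m
    have hDp := Dfun_pos arr m
    have hcand : ((Ifun arr m : Int) + (Dfun arr m : Int) - 1) = ((candN arr m : Nat) : Int) := by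
      unfold candN; push_cast; omega
    simp only [selNat]
    by_cases hlt : (selNat arr m).1 < candN arr m
    · rw [if_pos (by omega), if_pos hlt]
      simp only [Prod.mk.injEq]
      refine ⟨by omega, by omega, by omega⟩
    · rw [if_neg (by omega), if_neg hlt]

-- A's selection loop equals selNat
theorem selfold (arr : List Int) :
    (PySem.List.pyRange 0 (arr.length : Int) 1).foldl (fun (st : Int × Int × Int) i =>
        if st.1 < PySem.List.pyGetD ((List.range arr.length).map (fun j => (Ifun arr j : Int))) i 0
                 + PySem.List.pyGetD ((List.range arr.length).map (fun j => (Dfun arr j : Int))) i 0 - 1 then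
          (PySem.List.pyGetD ((List.range arr.length).map (fun j => (Ifun arr j : Int))) i 0
             + PySem.List.pyGetD ((List.range arr.length).map (fun j => (Dfun arr j : Int))) i 0 - 1,
           i - PySem.List.pyGetD ((List.range arr.length).map (fun j => (Ifun arr j : Int))) i 0 + 1,
           i + PySem.List.pyGetD ((List.range arr.length).map (fun j => (Dfun arr j : Int))) i 0 - 1)
        else st) ((1 : Int), (0 : Int), (0 : Int)) =
    (((selNat arr arr.length).1 : Int), ((selNat arr arr.length).2.1 : Int), ((selNat arr arr.length).2.2 : Int)) :=
  selfold_aux arr arr.length (le_refl _)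

-- B's loop body, named for the proofs
def bstep (arr : List Int) (st : Int × Int × Int × Int) (i : Int) : Int × Int × Int × Int :=
  let db :=
    if PySem.List.pyGetD arr i 0 > PySem.List.pyGetD arr (i + 1) 0 then
      (st.1 + 1, st.1 + 1)
    else if PySem.List.pyGetD arr i 0 < PySem.List.pyGetD arr (i + 1) 0 then
      ((1 : Int), st.2.1 + 1)
    else ((1 : Int), (1 : Int))
  if db.2 ≥ st.2.2.2 then (db.1, db.2, i, db.2)
  else (db.1, db.2, st.2.2.1, st.2.2.2)

theorem bstep_transition (arr : List Int) (i : Nat) (hi1 : i + 1 < arr.length) :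
    bstep arr ((Dfun arr (i + 1) : Int), (Bfun arr (i + 1) : Int), (bsf arr (i + 1) : Int), (maxB arr (i + 1) : Int)) (i : Int)
    = ((Dfun arr i : Int), (Bfun arr i : Int), (bsf arr i : Int), (maxB arr i : Int)) := by
  unfold bstep
  have hc1 : ((i : Int) + 1) = ((i + 1 : Nat) : Int) := by push_cast; ring
  rw [hc1]
  simp only [PySem.List.pyGetD_natCast]
  have hbs : bsf arr i = if maxB arr (i + 1) ≤ Bfun arr i then i else bsf arr (i + 1) := by
    rw [bsf, dif_pos hi1]
  have hmx : maxB arr i = max (Bfun arr i) (maxB arr (i + 1)) := by rw [maxB, dif_pos hi1]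
  by_cases h1 : arr.getD i 0 > arr.getD (i + 1) 0
  · have hD : Dfun arr i = Dfun arr (i + 1) + 1 := by rw [Dfun, dif_pos ⟨hi1, h1⟩]
    have hB : Bfun arr i = Dfun arr (i + 1) + 1 := by rw [Bfun, dif_pos hi1, if_pos h1]
    simp only [if_pos h1]
    by_cases hge : maxB arr (i + 1) ≤ Bfun arr i
    · rw [if_pos (by omega), hbs, if_pos hge]
      simp only [Prod.mk.injEq]
      refine ⟨by omega, by omega, trivial, by omega⟩
    · rw [if_neg (by omega), hbs, if_neg hge]
      simp only [Prod.mk.injEq]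
      refine ⟨by omega, by omega, trivial, by omega⟩
  · by_cases h2 : arr.getD i 0 < arr.getD (i + 1) 0
    · have hD : Dfun arr i = 1 := by rw [Dfun, dif_neg (by tauto)]
      have hB : Bfun arr i = Bfun arr (i + 1) + 1 := by
        rw [Bfun, dif_pos hi1, if_neg h1, if_pos h2]
      simp only [if_neg h1, if_pos h2]
      by_cases hge : maxB arr (i + 1) ≤ Bfun arr i
      · rw [if_pos (by omega), hbs, if_pos hge]
        simp only [Prod.mk.injEq]
        refine ⟨by omega, by omega, trivial, by omega⟩
      · rw [if_neg (by omega), hbs, if_neg hge]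
        simp only [Prod.mk.injEq]
        refine ⟨by omega, by omega, trivial, by omega⟩
    · have hD : Dfun arr i = 1 := by rw [Dfun, dif_neg (by tauto)]
      have hB : Bfun arr i = 1 := by rw [Bfun, dif_pos hi1, if_neg h1, if_neg h2]
      simp only [if_neg h1, if_neg h2]
      by_cases hge : maxB arr (i + 1) ≤ Bfun arr i
      · rw [if_pos (by omega), hbs, if_pos hge]
        simp only [Prod.mk.injEq]
        refine ⟨by omega, by omega, trivial, by omega⟩
      · rw [if_neg (by omega), hbs, if_neg hge]
        simp only [Prod.mk.injEq]
        refine ⟨by omega, by omega, trivial, by omega⟩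

theorem bfold_aux (arr : List Int) (i : Nat) (hi : i < arr.length) :
    (PySem.List.pyRange ((i : Int) - 1) (-1) (-1)).foldl (bstep arr)
      ((Dfun arr i : Int), (Bfun arr i : Int), (bsf arr i : Int), (maxB arr i : Int)) =
    ((Dfun arr 0 : Int), (Bfun arr 0 : Int), (bsf arr 0 : Int), (maxB arr 0 : Int)) := by
  induction i with
  | zero => rw [PySem.List.pyRange_neg_one_eq_nil (by norm_num), List.foldl_nil]
  | succ i ih =>
    have hcast : ((i + 1 : Nat) : Int) - 1 = (i : Int) := by push_cast; ring
    rw [hcast, PySem.List.pyRange_neg_one_cons (by omega), List.foldl_cons,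
      bstep_transition arr i hi, ih (by omega)]

-- B's loop equals (Dfun 0, Bfun 0, bsf 0, maxB 0)
theorem bfold (arr : List Int) (h : arr ≠ []) :
    (PySem.List.pyRange ((arr.length : Int) - 2) (-1) (-1)).foldl
      (fun (st : Int × Int × Int × Int) i =>
        let db :=
          if PySem.List.pyGetD arr i 0 > PySem.List.pyGetD arr (i + 1) 0 then
            (st.1 + 1, st.1 + 1)
          else if PySem.List.pyGetD arr i 0 < PySem.List.pyGetD arr (i + 1) 0 then
            ((1 : Int), st.2.1 + 1)
          else ((1 : Int), (1 : Int))
        if db.2 ≥ st.2.2.2 then (db.1, db.2, i, db.2)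
        else (db.1, db.2, st.2.2.1, st.2.2.2))
      ((1 : Int), (1 : Int), (arr.length : Int) - 1, (1 : Int)) =
    ((Dfun arr 0 : Int), (Bfun arr 0 : Int), (bsf arr 0 : Int), (maxB arr 0 : Int)) := by
  have hn : 0 < arr.length := List.length_pos_of_ne_nil h
  have hstepeq : (fun (st : Int × Int × Int × Int) i =>
        let db :=
          if PySem.List.pyGetD arr i 0 > PySem.List.pyGetD arr (i + 1) 0 then
            (st.1 + 1, st.1 + 1)
          else if PySem.List.pyGetD arr i 0 < PySem.List.pyGetD arr (i + 1) 0 then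
            ((1 : Int), st.2.1 + 1)
          else ((1 : Int), (1 : Int))
        if db.2 ≥ st.2.2.2 then (db.1, db.2, i, db.2)
        else (db.1, db.2, st.2.2.1, st.2.2.2)) = bstep arr := rfl
  have hD1 : Dfun arr (arr.length - 1) = 1 := by rw [Dfun, dif_neg (by omega)]
  have hB1 : Bfun arr (arr.length - 1) = 1 := by rw [Bfun, dif_neg (by omega)]
  have hbs1 : bsf arr (arr.length - 1) = arr.length - 1 := by rw [bsf, dif_neg (by omega)]
  have hmx1 : maxB arr (arr.length - 1) = 1 := by rw [maxB, dif_neg (by omega), hB1]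
  have hinit : ((1 : Int), (1 : Int), (arr.length : Int) - 1, (1 : Int)) =
      ((Dfun arr (arr.length - 1) : Int), (Bfun arr (arr.length - 1) : Int),
       (bsf arr (arr.length - 1) : Int), (maxB arr (arr.length - 1) : Int)) := by
    rw [hD1, hB1, hbs1, hmx1]
    simp only [Prod.mk.injEq]
    refine ⟨by norm_num, by norm_num, by omega, by norm_num⟩
  have hc2 : ((arr.length : Int) - 2) = ((arr.length - 1 : Nat) : Int) - 1 := by omega
  rw [hstepeq, hinit, hc2, bfold_aux arr (arr.length - 1) (by omega)]

-- ---- the combinatorial heart ----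

theorem Dfun_le_Bfun (arr : List Int) (i : Nat) : Dfun arr i ≤ Bfun arr i := by
  have hB := Bfun_pos arr i
  rw [Dfun, Bfun]
  split_ifs <;> omega

-- climbing one maximal increasing run: Bfun at the run start
theorem Bfun_start (arr : List Int) (i : Nat) (hi : i < arr.length) :
    Bfun arr (i + 1 - Ifun arr i) = Ifun arr i - 1 + Bfun arr i := by
  induction i with
  | zero => simp [Ifun]
  | succ i ih =>
    by_cases hg : arr.getD i 0 < arr.getD (i + 1) 0
    · have hI : Ifun arr (i + 1) = Ifun arr i + 1 := by
        simp only [Ifun]; rw [if_pos hg]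
      have hB : Bfun arr i = Bfun arr (i + 1) + 1 := by
        rw [Bfun, dif_pos hi, if_neg (by omega), if_pos hg]
      have hle := Ifun_le arr i
      have h1 : i + 1 + 1 - Ifun arr (i + 1) = i + 1 - Ifun arr i := by omega
      rw [h1, hI, ih (by omega), hB]
      have := Ifun_pos arr i
      omega
    · have hI : Ifun arr (i + 1) = 1 := by
        simp only [Ifun]; rw [if_neg hg]
      simp [hI]

theorem Bfun_le_maxB_self (arr : List Int) (i : Nat) : Bfun arr i ≤ maxB arr i := by
  rw [maxB]; split
  · exact le_max_left _ _
  · exact le_refl _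

theorem maxB_mono (arr : List Int) (i j : Nat) (hij : i ≤ j) (hj : j < arr.length) :
    maxB arr j ≤ maxB arr i := by
  rcases Nat.eq_or_lt_of_le hij with rfl | h
  · exact le_refl _
  · have h2 : i + 1 < arr.length := by omega
    have ih : maxB arr j ≤ maxB arr (i + 1) := maxB_mono arr (i + 1) j h hj
    have : maxB arr i = max (Bfun arr i) (maxB arr (i + 1)) := by rw [maxB, dif_pos h2]
    omega
termination_by j - i

theorem maxB_le (arr : List Int) (i j : Nat) (hij : i ≤ j) (hj : j < arr.length) :
    Bfun arr j ≤ maxB arr i :=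
  le_trans (Bfun_le_maxB_self arr j) (maxB_mono arr i j hij hj)

theorem bsf_lt (arr : List Int) (i : Nat) (hi : i < arr.length) :
    i ≤ bsf arr i ∧ bsf arr i < arr.length ∧ Bfun arr (bsf arr i) = maxB arr i := by
  by_cases h : i + 1 < arr.length
  · have hb : bsf arr i = if maxB arr (i + 1) ≤ Bfun arr i then i else bsf arr (i + 1) := by
      rw [bsf, dif_pos h]
    have hm : maxB arr i = max (Bfun arr i) (maxB arr (i + 1)) := by rw [maxB, dif_pos h]
    rw [hb, hm]
    by_cases hge : maxB arr (i + 1) ≤ Bfun arr i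
    · rw [if_pos hge]
      exact ⟨le_refl _, hi, (max_eq_left hge).symm⟩
    · rw [if_neg hge]
      have ih := bsf_lt arr (i + 1) h
      refine ⟨by omega, ih.2.1, ?_⟩
      rw [ih.2.2]
      exact (max_eq_right (by omega)).symm
  · have hb : bsf arr i = i := by rw [bsf, dif_neg h]
    have hm : maxB arr i = Bfun arr i := by rw [maxB, dif_neg h]
    rw [hb, hm]
    exact ⟨le_refl _, hi, rfl⟩
termination_by arr.length - i

theorem bsf_leftmost (arr : List Int) (i j : Nat) (hij : i ≤ j) (hj : j < arr.length)
    (hB : maxB arr i ≤ Bfun arr j) : bsf arr i ≤ j := by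
  rw [bsf]
  by_cases h : i + 1 < arr.length
  · rw [dif_pos h]
    by_cases hge : maxB arr (i + 1) ≤ Bfun arr i
    · rw [if_pos hge]; exact hij
    · rw [if_neg hge]
      have hmax : maxB arr i = max (Bfun arr i) (maxB arr (i + 1)) := by rw [maxB, dif_pos h]
      have hmax2 : maxB arr i = maxB arr (i + 1) := by omega
      rcases Nat.eq_or_lt_of_le hij with rfl | hlt
      · omega
      · exact bsf_leftmost arr (i + 1) j hlt hj (by omega)
  · rw [dif_neg h]; omega
termination_by arr.length - i

-- Bfun = Dfun where the climb stops
theorem Bfun_eq_Dfun_stop (arr : List Int) (s : Nat)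
    (h : ¬(s + 1 < arr.length ∧ arr.getD s 0 < arr.getD (s + 1) 0)) :
    Bfun arr s = Dfun arr s := by
  by_cases h1 : s + 1 < arr.length
  · by_cases h2 : arr.getD s 0 > arr.getD (s + 1) 0
    · rw [Bfun, dif_pos h1, if_pos h2]
      conv_rhs => rw [Dfun]
      rw [dif_pos ⟨h1, h2⟩]
    · have hD : Dfun arr s = 1 := by rw [Dfun, dif_neg (by tauto)]
      rw [Bfun, dif_pos h1, if_neg h2, if_neg (by tauto), hD]
  · have hD : Dfun arr s = 1 := by rw [Dfun, dif_neg (by tauto)]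
    rw [Bfun, dif_neg h1, hD]

-- properties of the increasing run from s to peakf s
theorem peak_spec (arr : List Int) (s : Nat) (hs : s < arr.length) :
    s ≤ peakf arr s ∧ peakf arr s < arr.length ∧
    Bfun arr (peakf arr s) = Dfun arr (peakf arr s) ∧
    Bfun arr s = (peakf arr s - s) + Bfun arr (peakf arr s) ∧
    Ifun arr (peakf arr s) ≥ (peakf arr s - s) + Ifun arr s := by
  rw [peakf]
  by_cases h : s + 1 < arr.length ∧ arr.getD s 0 < arr.getD (s + 1) 0
  · rw [dif_pos h]
    have ih := peak_spec arr (s + 1) h.1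
    have hB : Bfun arr s = Bfun arr (s + 1) + 1 := by
      rw [Bfun, dif_pos h.1, if_neg (by omega), if_pos h.2]
    have hI : Ifun arr (s + 1) = Ifun arr s + 1 := by
      simp only [Ifun]; rw [if_pos h.2]
    refine ⟨by omega, ih.2.1, ih.2.2.1, by omega, by omega⟩
  · rw [dif_neg h]
    exact ⟨le_refl _, hs, Bfun_eq_Dfun_stop arr s h, by omega, by omega⟩
termination_by arr.length - s

-- every index strictly below the peak climbs
theorem peak_climb (arr : List Int) (s j : Nat) (hs : s ≤ j) (hj : j < peakf arr s) :
    j + 1 < arr.length ∧ arr.getD j 0 < arr.getD (j + 1) 0 := by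
  by_cases h : s + 1 < arr.length ∧ arr.getD s 0 < arr.getD (s + 1) 0
  · have hp : peakf arr s = peakf arr (s + 1) := by rw [peakf, dif_pos h]
    rcases Nat.eq_or_lt_of_le hs with rfl | hlt
    · exact h
    · exact peak_climb arr (s + 1) j hlt (by omega)
  · have hp : peakf arr s = s := by rw [peakf, dif_neg h]
    omega
termination_by arr.length - s
decreasing_by
  have := hj
  rw [hp] at this
  by_cases h2 : s + 1 + 1 < arr.length ∧ arr.getD (s + 1) 0 < arr.getD (s + 1 + 1) 0
  · omega
  · omega

theorem Ifun_climb (arr : List Int) (s i : Nat) (hsi : s ≤ i) (hip : i ≤ peakf arr s) :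
    i + 1 ≤ Ifun arr i + s := by
  induction i with
  | zero => have := Ifun_pos arr 0; omega
  | succ i ih =>
    rcases Nat.eq_or_lt_of_le hsi with rfl | hlt
    · have := Ifun_pos arr (i + 1); omega
    · have hcl := peak_climb arr s i (by omega) (by omega)
      have hI : Ifun arr (i + 1) = Ifun arr i + 1 := by
        simp only [Ifun]; rw [if_pos hcl.2]
      have := ih (by omega) (by omega)
      omega

-- candidates are bounded by maxB
theorem cand_le_maxB (arr : List Int) (i : Nat) (hi : i < arr.length) :
    candN arr i ≤ maxB arr 0 := by
  have h1 := Bfun_start arr i hi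
  have h2 := Dfun_le_Bfun arr i
  have h4 := Ifun_pos arr i
  have h3 := maxB_le arr 0 (i + 1 - Ifun arr i) (by omega) (by omega)
  unfold candN
  omega

-- selNat's invariant
theorem selNat_spec (arr : List Int) (m : Nat) :
    (∀ i < m, candN arr i ≤ (selNat arr m).1) ∧
    (((selNat arr m) = (1, 0, 0)) ∨
      (∃ i < m, candN arr i = (selNat arr m).1 ∧
        (selNat arr m).2.1 = i + 1 - Ifun arr i ∧
        (selNat arr m).2.2 = i + Dfun arr i - 1 ∧
        (∀ j < i, candN arr j < (selNat arr m).1) ∧ 2 ≤ (selNat arr m).1)) := by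
  induction m with
  | zero => exact ⟨fun i hi => absurd hi (by omega), Or.inl rfl⟩
  | succ m ih =>
    have h1 : 1 ≤ (selNat arr m).1 := by
      rcases ih.2 with h | h
      · rw [h]
      · omega
    simp only [selNat]
    by_cases hlt : (selNat arr m).1 < candN arr m
    · rw [if_pos hlt]
      constructor
      · intro i hi
        rcases Nat.lt_succ_iff_lt_or_eq.mp hi with h | rfl
        · exact le_of_lt (lt_of_le_of_lt (ih.1 i h) hlt)
        · exact le_refl _
      · exact Or.inr ⟨m, by omega, rfl, rfl, rfl,
          fun j hj => lt_of_le_of_lt (ih.1 j hj) hlt, by omega⟩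
    · rw [if_neg hlt]
      constructor
      · intro i hi
        rcases Nat.lt_succ_iff_lt_or_eq.mp hi with h | rfl
        · exact ih.1 i h
        · omega
      · rcases ih.2 with h | ⟨i, hi, hrest⟩
        · exact Or.inl h
        · exact Or.inr ⟨i, by omega, hrest⟩

-- the main combinatorial theorem: A's selection and B's scan pick the same window
theorem main_window (arr : List Int) (h : arr ≠ []) :
    (selNat arr arr.length).2.1 = bsf arr 0 ∧
    (selNat arr arr.length).2.2 + 1 = bsf arr 0 + maxB arr 0 := by
  have hn : 0 < arr.length := List.length_pos_of_ne_nil h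
  obtain ⟨hs0, hslt, hsB⟩ := bsf_lt arr 0 hn
  have hB0 := Bfun_pos arr 0
  have hM1 : 1 ≤ maxB arr 0 := le_trans hB0 (Bfun_le_maxB_self arr 0)
  have hsel := selNat_spec arr arr.length
  by_cases hM : maxB arr 0 ≤ 1
  · -- no window longer than 1: A never updates, B's leftmost max is index 0
    have hsel0 : selNat arr arr.length = (1, 0, 0) := by
      rcases hsel.2 with h0 | ⟨i, hi, hc, _, _, _, h2⟩
      · exact h0
      · have := cand_le_maxB arr i hi
        omega
    have hbs0 : bsf arr 0 = 0 := by
      have := bsf_leftmost arr 0 0 (le_refl 0) hn (by omega)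
      omega
    rw [hsel0, hbs0]
    constructor
    · rfl
    · simp; omega
  · -- a window of length ≥ 2 exists
    have hM2 : 2 ≤ maxB arr 0 := by omega
    obtain ⟨hsp, hplt, hBD, hBrun, hIrun⟩ := peak_spec arr (bsf arr 0) hslt
    have hIs := Ifun_pos arr (bsf arr 0)
    have hIp := Ifun_pos arr (peakf arr (bsf arr 0))
    have hDp := Dfun_pos arr (peakf arr (bsf arr 0))
    -- the candidate at the peak of the run from bsf 0 attains maxB 0
    have hcandp : candN arr (peakf arr (bsf arr 0)) = maxB arr 0 := by
      have hle := cand_le_maxB arr (peakf arr (bsf arr 0)) hplt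
      unfold candN
      unfold candN at hle
      omega
    -- A's selection cannot be the default
    rcases hsel.2 with h0 | ⟨i, hi, hc, hst, hen, hmin, h2⟩
    · have := hsel.1 (peakf arr (bsf arr 0)) hplt
      rw [h0] at this
      simp at this
      omega
    · -- the selected value equals maxB 0
      have hLle : (selNat arr arr.length).1 ≤ maxB arr 0 := by
        rw [← hc]; exact cand_le_maxB arr i hi
      have hLge : maxB arr 0 ≤ (selNat arr arr.length).1 := by
        rw [← hcandp]; exact hsel.1 (peakf arr (bsf arr 0)) hplt
      have hL : (selNat arr arr.length).1 = maxB arr 0 := le_antisymm hLle hLge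
      have hIi := Ifun_pos arr i
      have hIle := Ifun_le arr i
      have hDi := Dfun_pos arr i
      -- B's start is at most A's start
      have hBs2 : Bfun arr (i + 1 - Ifun arr i) = maxB arr 0 := by
        have h1 := Bfun_start arr i hi
        have h2' := Dfun_le_Bfun arr i
        have h3 := maxB_le arr 0 (i + 1 - Ifun arr i) (by omega) (by omega)
        unfold candN at hc
        omega
      have hle1 : bsf arr 0 ≤ i + 1 - Ifun arr i :=
        bsf_leftmost arr 0 (i + 1 - Ifun arr i) (by omega) (by omega) (by omega)
      -- A's start is at most B's start
      have hle2 : i + 1 - Ifun arr i ≤ bsf arr 0 := by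
        by_contra hcon
        -- i is at most the peak (minimality of i) and at least bsf 0
        have hip : i ≤ peakf arr (bsf arr 0) := by
          by_contra hip
          have := hmin (peakf arr (bsf arr 0)) (by omega)
          omega
        have hsi : bsf arr 0 ≤ i := by omega
        have := Ifun_climb arr (bsf arr 0) i hsi hip
        omega
      rw [hst, hen]
      unfold candN at hc
      constructor
      · omega
      · omega

-- ===== VERDICT (by name: the statement is the Claim_ definition above) =====
theorem find_longest_bitonic_subarray_spec : Claim_equal_find_longest_bitonic_subarray := by
  intro arr _ hpre
  have hn : arr.length ≠ 0 := by simpa using hpre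
  unfold Spec_find_longest_bitonic_subarray
  unfold find_longest_bitonic_subarray find_longest_bitonic_subarray_alt
  rw [if_neg hn, if_neg (by exact_mod_cast hn)]
  simp only [Ifold, Dfold, selfold, bfold arr hpre]
  have hmw := main_window arr hpre
  rw [hmw.1]
  have : ((selNat arr arr.length).2.2 : Int) + 1 = (bsf arr 0 : Int) + (maxB arr 0 : Int) := by
    exact_mod_cast congrArg (Nat.cast (R := Int)) hmw.2
  rw [this]
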